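-- pv_equiv track=rewrite | github.com/loganturske/AI-Module2 | push.py | straights
-- ===== SOURCE A (Python) =====
-- from copy import deepcopy
-- from collections import Counter
-- from typing import List, Tuple, Any, Dict
--
-- def _transpose(lol: List[List[Any]]) -> List[List[Any]]:
--     return list(map(list, zip(*lol)))
--
-- def _sequence_winner(n, sequence):
--     counts = Counter(sequence)
--     if 'O' in counts and counts['O'] == n:
--         return 'O'
--     if 'X' in counts and counts['X'] == n:
--         return 'X'
--     return None
--
-- def straights(board: List[List[str]]) -> Dict[str, int]:
--     """
--     Count the number of straights on the board for each player. A
--     straight is a sequence of n pieces.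
--
--     Returns a Dict of values with the following format:
--
--     {'O': 2, 'X': 3, None: 5}
--
--     The winner is the player, 'O' or 'X', with the most straights (> 0).
--     """
--     board = deepcopy(board)
--     n = len(board)
--     straights = {"O": 0, "X": 0, None: 0}
--     # check for horizontals
--     for row in board:
--         winner = _sequence_winner(n, row)
--         straights[winner] += 1
--     # check main diagonal
--     diagonal = []
--     for i in range(0, n):
--         diagonal.append(board[i][i])
--     winner = _sequence_winner(n, diagonal)
--     straights[winner] += 1
--     # check for verticals:
--     board = _transpose(board)
--     for column in board:
--         winner = _sequence_winner(n, column)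
--         straights[winner] += 1
--     # off diagonal is the main diagonal of the transposed board.
--     diagonal = []
--     for i in range(0, n):
--         diagonal.append(board[i][n-i-1])
--     winner = _sequence_winner(n, diagonal)
--     straights[winner] += 1
--     return straights
-- ===== SOURCE B (Python) =====
-- _MIXED = object()
-- _UNSET = object()
--
-- def _step(state, c):
--     if state is _UNSET:
--         return c
--     return state if state == c else _MIXED
--
-- def straights(board):
--     n = len(board)
--     rows = [_UNSET] * n
--     cols = [_UNSET] * n
--     diag = _UNSET
--     anti = _UNSET
--     for i in range(n):
--         for j in range(n):
--             c = board[i][j]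
--             rows[i] = _step(rows[i], c)
--             cols[j] = _step(cols[j], c)
--             if i == j:
--                 diag = _step(diag, c)
--             if i + j == n - 1:
--                 anti = _step(anti, c)
--     result = {'O': 0, 'X': 0, None: 0}
--     for s in rows + cols + [diag, anti]:
--         result['O' if s == 'O' else 'X' if s == 'X' else None] += 1
--     return result
-- ===== Notes on version B (the rewrite author's own statement) =====
-- stated objective: alternative
-- what changed: B never materialises or classifies any line: it makes a single cell-by-cell scan of the board, streaming each cell into 2n+2 per-line accumulators (row/column/diagonal trackers that collapse to MIXED on the first mismatch), then reads the winners off the final tracker states, instead of A's deepcopy, Counter-based per-line classifier, transpose and four separate line passes.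
-- outside the precondition, e.g. on straights([['X', 'X']]): A returns {'O': 0, 'X': 4, None: 1}, B returns {'O': 0, 'X': 4, None: 0}; on straights([['X'], ['O', 'X']]): A raises IndexError, B raises IndexError
import Mathlib
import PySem

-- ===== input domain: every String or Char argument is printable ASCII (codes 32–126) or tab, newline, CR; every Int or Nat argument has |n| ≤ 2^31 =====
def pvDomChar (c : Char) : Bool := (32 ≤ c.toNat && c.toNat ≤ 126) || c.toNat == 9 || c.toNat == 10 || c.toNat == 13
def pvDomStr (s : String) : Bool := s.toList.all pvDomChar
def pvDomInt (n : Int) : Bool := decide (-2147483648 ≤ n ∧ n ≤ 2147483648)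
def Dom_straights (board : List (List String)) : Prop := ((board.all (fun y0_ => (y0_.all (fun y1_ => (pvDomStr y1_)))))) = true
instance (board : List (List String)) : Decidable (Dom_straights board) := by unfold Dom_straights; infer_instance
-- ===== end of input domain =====

-- B is an alternative: one cell-by-cell scan streaming each cell into 2n+2 per-line
-- trackers (collapsing to mixed on a mismatch), no line is ever materialised or
-- classified; A deep-copies, classifies each row/column/diagonal with a Counter and
-- transposes. The equivalence is about the return value only.

-- ===== PORT A =====
-- _sequence_winner(n, sequence): Counter-based classification
def seqWinner (n : Int) (seq : List String) : Option String :=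
  if (PySem.Dict.counter seq).contains "O" ∧ (PySem.Dict.counter seq).getD "O" 0 = n then some "O"
  else if (PySem.Dict.counter seq).contains "X" ∧ (PySem.Dict.counter seq).getD "X" 0 = n then some "X"
  else none

-- list(map(list, zip(*lol))): zip truncates every row to the minimum row length
def pyTranspose (lol : List (List String)) : List (List String) :=
  match lol with
  | [] => []
  | l :: ls =>
      let m := ls.foldl (fun a r => min a r.length) l.length
      (List.range m).map (fun i => (l :: ls).map (fun r => r.getD i ""))

-- board[i][j]; the index is in range on every access under Pre_straights (getD is exact there)
def cellA (board : List (List String)) (i j : Nat) : String := (board.getD i []).getD j ""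

def straights (board : List (List String)) : List (Option String × Int) :=
  let n := board.length
  let d0 : PySem.Dict (Option String) Int :=
    ((PySem.Dict.empty.insert (some "O") 0).insert (some "X") 0).insert none 0
  let d1 := board.foldl (fun d row => d.modify (seqWinner (n : Int) row) 0 (· + 1)) d0
  let diag := (List.range n).map (fun i => cellA board i i)
  let d2 := d1.modify (seqWinner (n : Int) diag) 0 (· + 1)
  let tb := pyTranspose board
  let d3 := tb.foldl (fun d col => d.modify (seqWinner (n : Int) col) 0 (· + 1)) d2
  let diag2 := (List.range n).map (fun i => cellA tb i (n - i - 1))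
  let d4 := d3.modify (seqWinner (n : Int) diag2) 0 (· + 1)
  d4.items

-- ===== PORT B =====
-- tracker state of one line: no cell seen yet / all cells so far equal v / mismatch seen
inductive Tr : Type
  | unset : Tr
  | mixed : Tr
  | val : String → Tr
deriving DecidableEq, Repr

def trStep (s : Tr) (c : String) : Tr :=
  match s with
  | .unset => .val c
  | .mixed => .mixed
  | .val v => if v = c then .val v else .mixed

def trKey (t : Tr) : Option String :=
  if t = .val "O" then some "O" else if t = .val "X" then some "X" else none

def straights_alt (board : List (List String)) : List (Option String × Int) :=
  let n := board.length
  let st : List Tr × List Tr × Tr × Tr :=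
    (List.range n).foldl (fun st i =>
      (List.range n).foldl (fun st j =>
        let c := (board.getD i []).getD j ""
        let rows := st.1.set i (trStep (st.1.getD i .unset) c)
        let cols := st.2.1.set j (trStep (st.2.1.getD j .unset) c)
        let dg := if i = j then trStep st.2.2.1 c else st.2.2.1
        let av := if i + j = n - 1 then trStep st.2.2.2 c else st.2.2.2
        (rows, cols, dg, av)) st)
      (List.replicate n Tr.unset, List.replicate n Tr.unset, Tr.unset, Tr.unset)
  let d0 : PySem.Dict (Option String) Int :=
    ((PySem.Dict.empty.insert (some "O") 0).insert (some "X") 0).insert none 0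
  let final := (st.1 ++ st.2.1 ++ [st.2.2.1, st.2.2.2]).foldl
      (fun d t => d.modify (trKey t) 0 (· + 1)) d0
  final.items

-- ===== PRECONDITION & SPEC =====
-- Pre_ restricts to square boards (every row of length n), the natural game-board domain;
-- outside it A raises IndexError on rows shorter than needed or, through zip truncation,
-- counts a number of columns different from n (see the cites in the claim).
def Pre_straights (board : List (List String)) : Prop :=
  ∀ row ∈ board, row.length = board.length
instance (board : List (List String)) : Decidable (Pre_straights board) := by
  unfold Pre_straights; infer_instance

def pvWitness_straights : List (List String) := [["X", "O"], ["O", "O"]]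

def Spec_straights (board : List (List String)) (out : List (Option String × Int)) : Prop := out = straights_alt board
instance (board : List (List String)) (out : List (Option String × Int)) : Decidable (Spec_straights board out) := by unfold Spec_straights; infer_instance

-- ===== CLAIM (what is proved, stated in full; the proofs are below) =====
def Claim_equal_straights : Prop := ∀ (board : List (List String)), Dom_straights board → Pre_straights board → Spec_straights board (straights board)

-- ===== LEMMAS AND PROOFS =====

-- the 3-key dict {'O':a,'X':b,None:c} both programs maintain
def mk3 (a b c : Int) : PySem.Dict (Option String) Int :=
  PySem.Dict.mk [(some "O", a), (some "X", b), (none, c)]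

theorem d0_eq_mk3 :
    (((PySem.Dict.empty.insert (some "O") (0:Int)).insert (some "X") 0).insert none 0)
      = mk3 0 0 0 := by rfl

theorem modify_mk3_O (a b c : Int) :
    (mk3 a b c).modify (some "O") 0 (· + 1) = mk3 (a + 1) b c := by rfl

theorem modify_mk3_X (a b c : Int) :
    (mk3 a b c).modify (some "X") 0 (· + 1) = mk3 a (b + 1) c := by rfl

theorem modify_mk3_N (a b c : Int) :
    (mk3 a b c).modify none 0 (· + 1) = mk3 a b (c + 1) := by rfl

-- folding "increment the key's counter" over mk3 counts the keys
theorem fold_modify_mk3 {α : Type} (key : α → Option String)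
    (hkey : ∀ s, key s = some "O" ∨ key s = some "X" ∨ key s = none) :
    ∀ (ls : List α) (a b c : Int),
      ls.foldl (fun d s => d.modify (key s) 0 (· + 1)) (mk3 a b c)
        = mk3 (a + (ls.countP (fun s => key s == some "O") : Int))
              (b + (ls.countP (fun s => key s == some "X") : Int))
              (c + (ls.countP (fun s => key s == none) : Int)) := by
  intro ls
  induction ls with
  | nil => intro a b c; simp
  | cons hd tl ih =>
    intro a b c
    rcases hkey hd with h | h | h
    · rw [List.foldl_cons, h, modify_mk3_O, ih]
      simp only [List.countP_cons, h, mk3, PySem.Dict.mk.injEq]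
      simp
      omega
    · rw [List.foldl_cons, h, modify_mk3_X, ih]
      simp only [List.countP_cons, h, mk3, PySem.Dict.mk.injEq]
      simp
      omega
    · rw [List.foldl_cons, h, modify_mk3_N, ih]
      simp only [List.countP_cons, h, mk3, PySem.Dict.mk.injEq]
      simp
      omega

theorem seqWinner_cases (n : Int) (s : List String) :
    seqWinner n s = some "O" ∨ seqWinner n s = some "X" ∨ seqWinner n s = none := by
  unfold seqWinner; split_ifs <;> simp

theorem trKey_cases (t : Tr) :
    trKey t = some "O" ∨ trKey t = some "X" ∨ trKey t = none := by
  unfold trKey; split_ifs <;> simp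

def classify (seq : List String) : Option String :=
  if seq ≠ [] ∧ seq.all (· == "O") then some "O"
  else if seq ≠ [] ∧ seq.all (· == "X") then some "X" else none

-- the streaming tracker, read off at the end, classifies exactly like `classify`
theorem trfold_mixed : ∀ s : List String, s.foldl trStep .mixed = .mixed := by
  intro s; induction s with
  | nil => rfl
  | cons h t ih => simpa [trStep] using ih

theorem trfold_val (v : String) :
    ∀ s : List String, s.foldl trStep (.val v) =
      if s.all (· == v) then Tr.val v else Tr.mixed := by
  intro s; induction s with
  | nil => simp
  | cons h t ih =>
    by_cases hv : v = h
    · subst hv; simpa [trStep] using ih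
    · simp [trStep, hv, Ne.symm hv, trfold_mixed]

theorem trKey_fold (s : List String) :
    trKey (s.foldl trStep .unset) = classify s := by
  cases s with
  | nil => rfl
  | cons h t =>
    have : (h :: t).foldl trStep .unset = t.foldl trStep (.val h) := rfl
    rw [this, trfold_val, classify]
    by_cases hO : h = "O"
    · subst hO
      by_cases ht : t.all (· == "O") <;> simp [ht, trKey]
    · by_cases hX : h = "X"
      · subst hX
        by_cases ht : t.all (· == "X") <;> simp [ht, trKey, hO]
      · have h1 : ¬ ((h :: t) ≠ [] ∧ (h :: t).all (· == "O")) := by simp [hO]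
        have h2 : ¬ ((h :: t) ≠ [] ∧ (h :: t).all (· == "X")) := by simp [hX]
        split_ifs with ha
        · simp [trKey, hO, hX]
        · simp [trKey]

-- the two classifiers agree on sequences of the advertised length
theorem classify_eq_seqWinner (n : Nat) (seq : List String) (h : seq.length = n) :
    classify seq = seqWinner (n : Int) seq := by
  have key : ∀ v : String, (seq ≠ [] ∧ seq.all (· == v)) ↔
      ((PySem.Dict.counter seq).contains v ∧ (PySem.Dict.counter seq).getD v 0 = (n : Int)) := by
    intro v
    rw [PySem.Dict.contains_counter, PySem.Dict.getD_counter]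
    constructor
    · rintro ⟨hne, hall⟩
      have hall' : ∀ c ∈ seq, c = v := by simpa using hall
      have hcnt : seq.count v = seq.length :=
        List.count_eq_length.mpr (fun b hb => (hall' b hb).symm)
      obtain ⟨x, hx⟩ := List.exists_mem_of_ne_nil seq hne
      have hv : v ∈ seq := (hall' x hx) ▸ hx
      refine ⟨by simpa using hv, ?_⟩
      rw [hcnt, h]
    · rintro ⟨hmem, hcnt⟩
      have hv : v ∈ seq := by simpa using hmem
      have hc : seq.count v = n := by exact_mod_cast hcnt
      have hall : ∀ b ∈ seq, v = b := List.count_eq_length.mp (by rw [hc, h])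
      exact ⟨List.ne_nil_of_mem hv, by simpa using fun b hb => (hall b hb).symm⟩
  unfold classify seqWinner
  rw [if_congr (key "O") rfl (if_congr (key "X") rfl rfl)]

theorem classify_reverse (s : List String) : classify s.reverse = classify s := by
  unfold classify; simp

-- map over a list as a map over range with getD
theorem map_eq_range_getD {α β : Type} (l : List α) (g : α → β) (d : α) :
    l.map g = (List.range l.length).map (fun j => g (l.getD j d)) := by
  refine List.ext_getElem (by simp) ?_
  intro i h1 h2
  have hi : i < l.length := by simpa using h1
  simp [List.getElem?_eq_getElem hi]

theorem foldl_min_const (n : Nat) :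
    ∀ (ls : List (List String)) (a : Nat), (∀ r ∈ ls, r.length = n) → a = n →
      ls.foldl (fun a r => min a r.length) a = n := by
  intro ls
  induction ls with
  | nil => intro a _ h; simpa using h
  | cons hd tl ih =>
    intro a hmem ha
    rw [List.foldl_cons]
    exact ih _ (fun r hr => hmem r (List.mem_cons_of_mem _ hr))
      (by rw [hmem hd (List.mem_cons_self), ha]; simp)

-- under a square board the zip-transpose is the index-built column list
theorem pyTranspose_eq (board : List (List String))
    (hpre : ∀ row ∈ board, row.length = board.length) :
    pyTranspose board =
      (List.range board.length).map
        (fun i => board.map (fun r => r.getD i "")) := by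
  cases board with
  | nil => rfl
  | cons l ls =>
    unfold pyTranspose
    have h : ls.foldl (fun a r => min a r.length) l.length = (l :: ls).length :=
      foldl_min_const (l :: ls).length ls l.length
        (fun r hr => hpre r (List.mem_cons_of_mem _ hr)) (hpre l List.mem_cons_self)
    show (List.range (ls.foldl (fun a r => min a r.length) l.length)).map
        (fun i => (l :: ls).map (fun r => r.getD i "")) = _
    rw [h]

-- setting an element of a range-map yields a range-map with the pointwise update
theorem set_range_map {β : Type} (n j : Nat) (hj : j < n) (f : Nat → β) (v : β) :
    ((List.range n).map f).set j v
      = (List.range n).map (fun k => if k = j then v else f k) := by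
  refine List.ext_getElem (by simp) ?_
  intro i h1 h2
  have hi : i < n := by simpa using h1
  by_cases hij : i = j
  · subst hij; simp [List.getElem_set]
  · have hji : j ≠ i := fun h => hij h.symm
    simp [List.getElem_set, hij, hji]

theorem getD_range_map {β : Type} (n j : Nat) (hj : j < n) (f : Nat → β) (d : β) :
    ((List.range n).map f).getD j d = f j := by
  rw [List.getD_eq_getElem _ _ (by simpa using hj)]
  simp

-- one inner (column-index) pass of B, characterised
theorem inner_pass (n : Nat) (cell : Nat → Nat → String) (i : Nat) (hi : i < n)
    (f g : Nat → Tr) (dg av : Tr) :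
    ∀ (m : Nat), m ≤ n →
    (List.range m).foldl (fun st j =>
        let c := cell i j
        let rows := st.1.set i (trStep (st.1.getD i .unset) c)
        let cols := st.2.1.set j (trStep (st.2.1.getD j .unset) c)
        let dg := if i = j then trStep st.2.2.1 c else st.2.2.1
        let av := if i + j = n - 1 then trStep st.2.2.2 c else st.2.2.2
        (rows, cols, dg, av))
      ((List.range n).map f, (List.range n).map g, dg, av)
    = ((List.range n).map (fun k => if k = i then ((List.range m).map (cell i)).foldl trStep (f i) else f k),
       (List.range n).map (fun j => if j < m then trStep (g j) (cell i j) else g j),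
       if i < m then trStep dg (cell i i) else dg,
       if n - 1 - i < m then trStep av (cell i (n - 1 - i)) else av) := by
  intro m
  induction m with
  | zero =>
    intro _
    simp only [List.range_zero, List.map_nil, List.foldl_nil, Nat.not_lt_zero, if_neg,
      Nat.lt_irrefl]
    refine Prod.ext ?_ (Prod.ext ?_ rfl)
    · simp only [Prod.fst]
      refine (List.map_congr_left ?_).symm
      intro k _; by_cases hk : k = i <;> simp [hk]
    · rfl
  | succ m ih =>
    intro hm
    have hm' : m ≤ n := Nat.le_of_succ_le hm
    have hmn : m < n := hm
    rw [List.range_succ, List.foldl_append, ih hm', List.foldl_cons, List.foldl_nil]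
    simp only []
    refine Prod.ext ?_ (Prod.ext ?_ (Prod.ext ?_ ?_))
    · -- rows component
      show ((List.range n).map (fun k => if k = i then ((List.range m).map (cell i)).foldl trStep (f i) else f k)).set i
          (trStep (((List.range n).map (fun k => if k = i then ((List.range m).map (cell i)).foldl trStep (f i) else f k)).getD i .unset) (cell i m)) = _
      rw [getD_range_map n i hi, set_range_map n i hi]
      simp only [if_pos rfl]
      refine List.map_congr_left ?_
      intro k _
      by_cases hk : k = i
      · subst hk
        simp [List.map_append, List.foldl_append]
      · simp [hk]
    · -- cols component
      show ((List.range n).map (fun j => if j < m then trStep (g j) (cell i j) else g j)).set m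
          (trStep (((List.range n).map (fun j => if j < m then trStep (g j) (cell i j) else g j)).getD m .unset) (cell i m)) = _
      rw [getD_range_map n m hmn, set_range_map n m hmn]
      simp only [Nat.lt_irrefl, if_neg, if_false]
      refine List.map_congr_left ?_
      intro j _
      by_cases hj : j = m
      · subst hj; simp
      · by_cases hjm : j < m
        · simp [hj, hjm, Nat.lt_succ_of_lt hjm]
        · have : ¬ j < m + 1 := by omega
          simp [hj, hjm, this]
    · -- diag component
      show (if i = m then trStep (if i < m then trStep dg (cell i i) else dg) (cell i m) else if i < m then trStep dg (cell i i) else dg) = _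
      by_cases him : i = m
      · subst him; simp
      · by_cases hlt : i < m
        · simp [him, hlt, Nat.lt_succ_of_lt hlt]
        · have : ¬ i < m + 1 := by omega
          simp [him, hlt, this]
    · -- anti component
      show (if i + m = n - 1 then trStep (if n - 1 - i < m then trStep av (cell i (n - 1 - i)) else av) (cell i m) else if n - 1 - i < m then trStep av (cell i (n - 1 - i)) else av) = _
      by_cases he : i + m = n - 1
      · have h1 : n - 1 - i = m := by omega
        have h2 : ¬ n - 1 - i < m := by omega
        simp [he, h1, h2]
      · by_cases hlt : n - 1 - i < m
        · simp [he, hlt, Nat.lt_succ_of_lt hlt]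
        · have hne : ¬ n - 1 - i < m + 1 := by
            intro hc
            have : n - 1 - i = m := by omega
            have hi' : i ≤ n - 1 := by omega
            exact he (by omega)
          simp [he, hlt, hne]

-- the full double fold of B, characterised: each tracker holds its line's stream fold
theorem outer_pass (n : Nat) (cell : Nat → Nat → String) :
    ∀ (m : Nat), m ≤ n →
    (List.range m).foldl (fun st i =>
      (List.range n).foldl (fun st j =>
        let c := cell i j
        let rows := st.1.set i (trStep (st.1.getD i .unset) c)
        let cols := st.2.1.set j (trStep (st.2.1.getD j .unset) c)
        let dg := if i = j then trStep st.2.2.1 c else st.2.2.1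
        let av := if i + j = n - 1 then trStep st.2.2.2 c else st.2.2.2
        (rows, cols, dg, av)) st)
      (List.replicate n Tr.unset, List.replicate n Tr.unset, Tr.unset, Tr.unset)
    = ((List.range n).map (fun k => if k < m then ((List.range n).map (cell k)).foldl trStep .unset else .unset),
       (List.range n).map (fun j => ((List.range m).map (fun k => cell k j)).foldl trStep .unset),
       ((List.range m).map (fun k => cell k k)).foldl trStep .unset,
       ((List.range m).map (fun k => cell k (n - 1 - k))).foldl trStep .unset) := by
  intro m
  induction m with
  | zero =>
    intro _
    simp only [List.range_zero, List.foldl_nil, List.map_nil]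
    refine Prod.ext ?_ (Prod.ext ?_ rfl)
    · show List.replicate n Tr.unset = _
      refine List.ext_getElem (by simp) ?_
      intro i h1 h2; simp
    · show List.replicate n Tr.unset = _
      refine List.ext_getElem (by simp) ?_
      intro i h1 h2; simp
  | succ m ih =>
    intro hm
    have hm' : m ≤ n := Nat.le_of_succ_le hm
    have hmn : m < n := hm
    rw [List.range_succ, List.foldl_append, ih hm', List.foldl_cons, List.foldl_nil]
    rw [inner_pass n cell m hmn _ _ _ _ n (Nat.le_refl n)]
    refine Prod.ext ?_ (Prod.ext ?_ (Prod.ext ?_ ?_))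
    · simp only [Prod.fst]
      refine List.map_congr_left ?_
      intro k hk
      by_cases hkm : k = m
      · subst hkm
        have : ¬ k < k := Nat.lt_irrefl _
        simp [Nat.lt_succ_self, Nat.lt_irrefl]
      · by_cases hlt : k < m
        · simp [hkm, hlt, Nat.lt_succ_of_lt hlt]
        · have : ¬ k < m + 1 := by omega
          simp [hkm, hlt, this]
    · simp only [Prod.snd, Prod.fst]
      refine List.map_congr_left ?_
      intro j hj
      have hj' : j < n := List.mem_range.mp hj
      rw [if_pos hj', List.map_append, List.foldl_append]
      rfl
    · simp only [Prod.snd, Prod.fst]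
      rw [if_pos hmn, List.map_append, List.foldl_append]
      rfl
    · simp only [Prod.snd]
      have hlt : n - 1 - m < n := by omega
      rw [if_pos hlt, List.map_append, List.foldl_append]
      rfl

theorem straights_spec_aux (board : List (List String))
    (hpre : ∀ row ∈ board, row.length = board.length) :
    straights board = straights_alt board := by
  set n := board.length with hn
  set cell : Nat → Nat → String := fun i j => (board.getD i []).getD j "" with hcell
  set dg : List String := (List.range n).map (fun i => cell i i) with hdg
  set av : List String := (List.range n).map (fun i => cell (n - 1 - i) i) with hav
  set avB : List String := (List.range n).map (fun k => cell k (n - 1 - k)) with havB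
  set cols : List (List String) :=
    (List.range n).map (fun j => (List.range n).map (fun k => cell k j)) with hc
  set rowsL : List (List String) :=
    (List.range n).map (fun k => (List.range n).map (cell k)) with hr
  -- each index-rebuilt row is the row itself
  have hrows : rowsL = board := by
    rw [hr]
    refine List.ext_getElem (by simp [hn]) ?_
    intro i h1 h2
    have hi : i < n := by simpa using h1
    simp only [List.getElem_map, List.getElem_range]
    have hlen : board[i].length = n := hpre board[i] (List.getElem_mem h2)
    have hthis : board[i] = (List.range n).map (fun j => (board[i]).getD j "") := by
      have h := map_eq_range_getD board[i] id ""
      simp only [List.map_id] at h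
      rw [hlen] at h
      exact h
    rw [hthis]
    refine List.map_congr_left ?_
    intro j _
    show cell i j = board[i].getD j ""
    rw [hcell]
    simp only []
    rw [List.getD_eq_getElem _ _ h2]
  -- zip-transpose = the index-built columns
  have hcols : pyTranspose board = cols := by
    rw [pyTranspose_eq board hpre, hc]
    refine List.map_congr_left (fun i _ => ?_)
    have := map_eq_range_getD board (fun r => r.getD i "") []
    rw [← hn] at this
    rw [this]
  -- the main diagonal of A is dg
  have hdiagA : (List.range n).map (fun i => cellA board i i) = dg := by
    rw [hdg]; rfl
  -- the anti-diagonal of A (main diagonal of the transpose) is av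
  have hanti : ∀ i, i < n → cellA cols i (n - i - 1) = cell (n - 1 - i) i := by
    intro i hi
    have e1 : cols.getD i [] = (List.range n).map (fun k => cell k i) := by
      rw [hc, List.getD_eq_getElem _ _ (by simpa using hi)]
      simp
    have h2 : n - i - 1 < n := by omega
    unfold cellA
    rw [e1, List.getD_eq_getElem _ _ (by simpa using h2)]
    simp only [List.getElem_map, List.getElem_range]
    have h3 : n - i - 1 = n - 1 - i := by omega
    rw [h3]
  have hantiA : (List.range n).map (fun i => cellA cols i (n - i - 1)) = av := by
    rw [hav]
    exact List.map_congr_left (fun i hi => hanti i (List.mem_range.mp hi))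
  -- B's anti-diagonal order is the reverse of A's
  have havrev : avB = av.reverse := by
    rw [havB, hav]
    refine List.ext_getElem (by simp) ?_
    intro i h1 h2
    have hi : i < n := by simpa using h1
    simp only [List.getElem_reverse, List.getElem_map, List.getElem_range, List.length_map,
      List.length_range]
    have : n - 1 - (n - 1 - i) = i := by omega
    rw [this]
  -- A as one fold over its four groups of lines
  have hA : straights board =
      ((board ++ [dg] ++ cols ++ [av]).foldl
        (fun d s => d.modify (seqWinner (n : Int) s) 0 (· + 1)) (mk3 0 0 0)).items := by
    simp only [straights, d0_eq_mk3, List.foldl_append, List.foldl_cons, List.foldl_nil, hcols]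
    rw [← hn, hdiagA, hantiA]
  -- B: the double fold leaves each line's stream fold in its tracker
  have hst := outer_pass n cell n (Nat.le_refl n)
  have hlines :
      (List.range n).map (fun k => if k < n then ((List.range n).map (cell k)).foldl trStep Tr.unset else Tr.unset)
        = board.map (fun s => s.foldl trStep Tr.unset) := by
    rw [← hrows, hr, List.map_map]
    refine List.map_congr_left ?_
    intro k hk
    have hk' := List.mem_range.mp hk
    simp [hk']
  have hcolsT : (List.range n).map (fun j => ((List.range n).map (fun k => cell k j)).foldl trStep Tr.unset)
        = cols.map (fun s => s.foldl trStep Tr.unset) := by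
    rw [hc, List.map_map]
    rfl
  have hB : straights_alt board =
      (((board ++ cols ++ [dg, avB]).map (fun s => s.foldl trStep Tr.unset)).foldl
        (fun d t => d.modify (trKey t) 0 (· + 1)) (mk3 0 0 0)).items := by
    simp only [straights_alt, d0_eq_mk3]
    rw [← hn]
    rw [hst]
    rw [List.map_append, List.map_append, List.map_cons, List.map_cons, List.map_nil]
    rw [hlines, hcolsT]
  -- every line classified has length n
  have hlenA : ∀ s ∈ board ++ [dg] ++ cols ++ [av], s.length = n := by
    intro s hs
    simp only [List.append_assoc, List.mem_append, List.mem_singleton, List.mem_cons,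
      List.not_mem_nil, or_false] at hs
    rcases hs with hs | hs | hs | hs
    · exact hpre s hs
    · subst hs; rw [hdg]; simp
    · rw [hc] at hs
      obtain ⟨i, _, rfl⟩ := List.mem_map.mp hs
      simp
    · subst hs; rw [hav]; simp
  have hlenB : ∀ s ∈ board ++ cols ++ [dg, avB], s.length = n := by
    intro s hs
    simp only [List.append_assoc, List.mem_append, List.mem_cons, List.not_mem_nil,
      or_false, List.mem_singleton] at hs
    rcases hs with hs | hs | hs | hs
    · exact hpre s hs
    · rw [hc] at hs
      obtain ⟨i, _, rfl⟩ := List.mem_map.mp hs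
      simp
    · subst hs; rw [hdg]; simp
    · subst hs; rw [havB]; simp
  -- counts on both sides reduce to `classify` counts over the same multiset of lines
  have hcnt : ∀ k : Option String,
      ((board ++ cols ++ [dg, avB]).map (fun s => s.foldl trStep .unset)).countP
          (fun t => trKey t == k)
        = (board ++ [dg] ++ cols ++ [av]).countP (fun s => seqWinner (n : Int) s == k) := by
    intro k
    rw [List.countP_map]
    have e1 : (board ++ cols ++ [dg, avB]).countP (fun s => trKey (s.foldl trStep .unset) == k)
        = (board ++ cols ++ [dg, avB]).countP (fun s => classify s == k) :=
      List.countP_congr (fun s _ => by rw [trKey_fold])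
    have e2 : (board ++ cols ++ [dg, avB]).countP (fun s => classify s == k)
        = (board ++ cols ++ [dg, av]).countP (fun s => classify s == k) := by
      simp only [List.countP_append, List.countP_cons, List.countP_nil]
      rw [havrev, classify_reverse]
    have e3 : (board ++ cols ++ [dg, av]).countP (fun s => classify s == k)
        = (board ++ [dg] ++ cols ++ [av]).countP (fun s => classify s == k) := by
      simp only [List.countP_append, List.countP_cons, List.countP_nil]
      ring
    have e4 : (board ++ [dg] ++ cols ++ [av]).countP (fun s => classify s == k)
        = (board ++ [dg] ++ cols ++ [av]).countP (fun s => seqWinner (n : Int) s == k) :=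
      List.countP_congr (fun s hs => by rw [classify_eq_seqWinner n s (hlenA s hs)])
    calc (board ++ cols ++ [dg, avB]).countP (fun s => trKey (s.foldl trStep .unset) == k)
        = _ := e1
      _ = _ := e2
      _ = _ := e3
      _ = _ := e4
  rw [hA, hB, fold_modify_mk3 _ (seqWinner_cases (n : Int)), fold_modify_mk3 _ trKey_cases,
    hcnt (some "O"), hcnt (some "X"), hcnt none]

-- ===== VERDICT (by name: the statement is the Claim_ definition above) =====
theorem straights_spec : Claim_equal_straights := by
  intro board _ hpre
  exact straights_spec_aux board hpre
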